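-- pv_equiv track=rewrite | github.com/sea-lab-space/MIND | BE-mh-narrative-dashboard/passive_data_extraction/utils/feature_loader.py | _get_usable_feature_name
-- ===== SOURCE A (Python) =====
-- def _get_usable_feature_name(col):
--         parts = col.split(':')
--         if len(parts) >= 2:
--             feature_part = parts[1]
--             # split by _
--             feature_name_split = feature_part.split("_")
--             # get actual feature name
--             feature_name_after = ["rapids", "doryab", "barnett", "locmap"]
--             actual_name_split = []
--             flag = False
--             for feature_split in feature_name_split:
--                 if flag:
--                     actual_name_split.append(feature_split)
--                 if feature_split in feature_name_after:
--                     flag = True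
--                     continue
--             actual_name = "_".join(actual_name_split)
--             return actual_name + ":" + parts[-1]
--         else:
--             return col
-- ===== SOURCE B (Python) =====
-- def _get_usable_feature_name(col):
--     parts = col.split(':')
--     if len(parts) < 2:
--         return col
--     segs = parts[1].split('_')
--     markers = ("rapids", "doryab", "barnett", "locmap")
--     idx = next((i for i, s in enumerate(segs) if s in markers), None)
--     actual_name = '' if idx is None else '_'.join(segs[idx + 1:])
--     return actual_name + ':' + parts[-1]
-- ===== Notes on version B (the rewrite author's own statement) =====
-- stated objective: simpler
-- what changed: Replaces the flag-driven accumulator loop with finding the index of the first marker segment and joining the slice after it.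
import Mathlib
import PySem

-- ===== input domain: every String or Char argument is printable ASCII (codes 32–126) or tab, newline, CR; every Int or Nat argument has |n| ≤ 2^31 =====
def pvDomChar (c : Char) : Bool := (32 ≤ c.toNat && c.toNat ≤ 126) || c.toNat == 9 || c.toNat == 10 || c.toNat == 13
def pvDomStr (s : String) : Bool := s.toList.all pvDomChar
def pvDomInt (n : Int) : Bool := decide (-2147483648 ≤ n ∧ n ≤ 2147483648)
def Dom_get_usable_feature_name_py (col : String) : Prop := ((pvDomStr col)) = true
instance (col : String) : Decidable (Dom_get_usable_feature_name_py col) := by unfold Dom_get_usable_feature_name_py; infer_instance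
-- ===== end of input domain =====

-- B replaces A's flag-driven accumulator loop by locating the first marker with findIdx? and
-- slicing everything after it (objective: simpler decomposition; same cost).

-- ===== PORT A =====
-- A's loop body: 'if flag: append; if feature_split in feature_name_after: flag = True; continue'
def pvStepA (feature_name_after : List String) (st : List String × Bool) (feature_split : String) :
    List String × Bool :=
  let acc := if st.2 then st.1 ++ [feature_split] else st.1
  let flag := if feature_name_after.contains feature_split then true else st.2
  (acc, flag)

-- literal port of A: split on ':', then a flag/accumulator fold over the '_'-split of parts[1]
def get_usable_feature_name_py (col : String) : String :=
  let parts := (PySem.Str.split? col ":").getD []  -- sep ":" ≠ "", so split? is always some: exact port of col.split(":")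
  if 2 ≤ parts.length then
    -- parts[1] and parts[-1]: both indices are in range since parts.length ≥ 2 (exact)
    let feature_part := (PySem.List.pyGet? parts 1).getD ""
    let feature_name_split := (PySem.Str.split? feature_part "_").getD []
    let feature_name_after := ["rapids", "doryab", "barnett", "locmap"]
    let st := feature_name_split.foldl (pvStepA feature_name_after) ([], false)
    let actual_name := PySem.Str.join "_" st.1
    actual_name ++ ":" ++ (PySem.List.pyGet? parts (-1)).getD ""
  else
    col

-- ===== PORT B =====
-- port of Source B: find the index of the first marker, join the tail after it
def get_usable_feature_name_py_alt (col : String) : String :=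
  let parts := (PySem.Str.split? col ":").getD []  -- sep ":" ≠ "", so split? is always some: exact port of col.split(":")
  if parts.length < 2 then
    col
  else
    let segs := (PySem.Str.split? ((PySem.List.pyGet? parts 1).getD "") "_").getD []
    let markers := ["rapids", "doryab", "barnett", "locmap"]
    let actual_name :=
      match segs.findIdx? (fun s => markers.contains s) with
      | none => ""
      -- segs[i+1:] with i+1 ≥ 0 is exactly List.drop (i+1)
      | some i => PySem.Str.join "_" (segs.drop (i + 1))
    actual_name ++ ":" ++ (PySem.List.pyGet? parts (-1)).getD ""

-- ===== PRECONDITION & SPEC =====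
def Spec_get_usable_feature_name_py (col : String) (out : String) : Prop := out = get_usable_feature_name_py_alt col
instance (col : String) (out : String) : Decidable (Spec_get_usable_feature_name_py col out) := by unfold Spec_get_usable_feature_name_py; infer_instance

-- ===== CLAIM (what is proved, stated in full; the proofs are below) =====
def Claim_equal_get_usable_feature_name_py : Prop := ∀ (col : String), Dom_get_usable_feature_name_py col → Spec_get_usable_feature_name_py col (get_usable_feature_name_py col)

-- ===== LEMMAS AND PROOFS =====

-- once the flag is true, A's loop appends every remaining element
theorem loopA_flag_true (after : List String) (l acc : List String) :
    (l.foldl (pvStepA after) (acc, true)).1 = acc ++ l := by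
  induction l generalizing acc with
  | nil => simp
  | cons x xs ih => simp [List.foldl_cons, pvStepA, ih]

-- with the flag still false, A's loop collects exactly the elements after the first marker
theorem loopA_flag_false (after : List String) (l acc : List String) :
    (l.foldl (pvStepA after) (acc, false)).1 =
      acc ++ (match l.findIdx? (fun s => after.contains s) with
              | none => []
              | some i => l.drop (i + 1)) := by
  induction l generalizing acc with
  | nil => simp
  | cons x xs ih =>
    by_cases hx : after.contains x = true
    · have hx' : x ∈ after := by simpa using hx
      rw [List.foldl_cons, show pvStepA after (acc, false) x = (acc, true) by simp [pvStepA, hx']]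
      simp [loopA_flag_true, List.findIdx?_cons, hx']
    · have hx' : x ∉ after := by simpa using hx
      rw [List.foldl_cons, show pvStepA after (acc, false) x = (acc, false) by simp [pvStepA, hx']]
      rw [ih acc]
      simp only [List.findIdx?_cons]
      rw [if_neg (by simpa using hx')]
      cases h : xs.findIdx? (fun s => after.contains s) <;> simp_all

-- ===== VERDICT (by name: the statement is the Claim_ definition above) =====
theorem get_usable_feature_name_py_spec : Claim_equal_get_usable_feature_name_py := by
  intro col _
  unfold Spec_get_usable_feature_name_py get_usable_feature_name_py get_usable_feature_name_py_alt
  simp only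
  by_cases h : 2 ≤ ((PySem.Str.split? col ":").getD []).length
  · rw [if_pos h, if_neg (by omega)]
    rw [loopA_flag_false]
    simp only [List.nil_append]
    cases hfi : ((PySem.Str.split? ((PySem.List.pyGet? ((PySem.Str.split? col ":").getD []) 1).getD "") "_").getD []).findIdx?
        (fun s => (["rapids", "doryab", "barnett", "locmap"]).contains s) with
    | none => simp [PySem.Str.join]
    | some i => simp
  · rw [if_neg h, if_pos (by omega)]
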